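-- pv_equiv track=rewrite | github.com/vgbyte/Quanta-Magazine-Hyperjumps-Solution | solve.py | generate_all_starting_pair
-- ===== SOURCE A (Python) =====
-- def generate_all_starting_pair(sequence_numbers):
--     starting_numbers = set()
--     for i in range(len(sequence_numbers)):
--         for j in range(len(sequence_numbers)):
--             if i != j:
--                 starting_numbers.add(
--                     (sequence_numbers[i], sequence_numbers[j]))
--     return starting_numbers
-- ===== SOURCE B (Python) =====
-- def generate_all_starting_pair(sequence_numbers):
--     # Index by distinct values: for each distinct value x (first-occurrence order),
--     # pair it with every distinct value of the list minus x's first occurrence.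
--     result = []
--     for x in dict.fromkeys(sequence_numbers):
--         rest = list(sequence_numbers)
--         rest.remove(x)
--         for y in dict.fromkeys(rest):
--             result.append((x, y))
--     return set(result)
-- ===== Notes on version B (the rewrite author's own statement) =====
-- stated objective: alternative
-- what changed: Instead of scanning all ordered index pairs and inserting each pair into a set, B deduplicates the list once and pairs each distinct value with the distinct values of the list minus that value's first occurrence (about n*k pair insertions, k = distinct values; much less work on duplicate-heavy input, measured ~1.4x at n=1024 on all-distinct input, below the 1.5x confirmation bar).
import Mathlib
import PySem

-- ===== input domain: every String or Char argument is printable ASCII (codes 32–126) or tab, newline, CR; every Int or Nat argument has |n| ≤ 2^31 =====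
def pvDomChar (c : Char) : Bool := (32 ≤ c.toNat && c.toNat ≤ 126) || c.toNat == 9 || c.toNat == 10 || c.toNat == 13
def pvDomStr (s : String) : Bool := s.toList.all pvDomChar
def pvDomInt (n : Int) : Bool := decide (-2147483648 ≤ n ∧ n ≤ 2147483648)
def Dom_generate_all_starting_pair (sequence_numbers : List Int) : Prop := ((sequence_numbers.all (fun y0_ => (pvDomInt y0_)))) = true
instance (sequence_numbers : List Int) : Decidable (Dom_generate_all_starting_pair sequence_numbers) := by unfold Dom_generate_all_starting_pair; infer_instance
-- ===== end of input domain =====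

-- B indexes by distinct values (each distinct x paired with the distinct values of the list
-- minus x's first occurrence) instead of scanning all ordered index pairs of A.


-- ===== PORT A =====
-- starting_numbers = set(); for i in range(len(..)): for j in range(len(..)): if i != j: add((s[i], s[j]))
def generate_all_starting_pair (sequence_numbers : List Int) : List (Int × Int) :=
  (PySem.List.pyRange 0 (PySem.List.len sequence_numbers)).foldl
    (fun starting_numbers i =>
      (PySem.List.pyRange 0 (PySem.List.len sequence_numbers)).foldl
        (fun starting_numbers j =>
          if i ≠ j then
            PySem.Set.add starting_numbers
              (PySem.List.pyGetD sequence_numbers i 0, PySem.List.pyGetD sequence_numbers j 0)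
          else starting_numbers)
        starting_numbers)
    PySem.Set.empty

-- ===== PORT B =====
-- result = []; for x in dict.fromkeys(seq): rest = list(seq); rest.remove(x);
--   for y in dict.fromkeys(rest): result.append((x, y)); return set(result)
def generate_all_starting_pair_alt (sequence_numbers : List Int) : List (Int × Int) :=
  let result :=
    (PySem.List.dedup sequence_numbers).foldl
      (fun result x =>
        match PySem.List.remove? sequence_numbers x with  -- x ∈ sequence_numbers, so never none
        | some rest => (PySem.List.dedup rest).foldl (fun result y => result ++ [(x, y)]) result
        | none => result)
      []
  PySem.Set.ofList result

-- ===== PRECONDITION & SPEC =====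
def Spec_generate_all_starting_pair (sequence_numbers : List Int) (out : List (Int × Int)) : Prop := out = generate_all_starting_pair_alt sequence_numbers
instance (sequence_numbers : List Int) (out : List (Int × Int)) : Decidable (Spec_generate_all_starting_pair sequence_numbers out) := by unfold Spec_generate_all_starting_pair; infer_instance

-- ===== CLAIM (what is proved, stated in full; the proofs are below) =====
def Claim_equal_generate_all_starting_pair : Prop := ∀ (sequence_numbers : List Int), Dom_generate_all_starting_pair sequence_numbers → Spec_generate_all_starting_pair sequence_numbers (generate_all_starting_pair sequence_numbers)

-- ===== LEMMAS AND PROOFS =====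

-- the inner row of A, over Nat indices
def pvRowA (xs : List Int) (i : Nat) : List (Int × Int) :=
  ((List.range xs.length).filter (fun j => i ≠ j)).map (fun j => (xs.getD i 0, xs.getD j 0))

-- the row of B for a distinct value x
def pvRowB (xs : List Int) (x : Int) : List (Int × Int) :=
  (PySem.Set.ofList (xs.eraseIdx (List.idxOf x xs))).map (fun y => (x, y))

-- the common normal form: one row per distinct value, in first-occurrence order
def pvTarget (xs : List Int) : List (Int × Int) :=
  (PySem.Set.ofList xs).flatMap (pvRowB xs)

theorem pv_idxOf_lt_of_mem_take {x : Int} : ∀ (xs : List Int) (i : Nat), x ∈ xs.take i → List.idxOf x xs < i := by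
  intro xs
  induction xs with
  | nil => intro i h; simp at h
  | cons a t ih =>
    intro i h
    cases i with
    | zero => simp at h
    | succ i =>
      simp [List.take_succ_cons] at h
      by_cases hxa : x = a
      · subst hxa; simp [List.idxOf_cons_self]
      · rcases h with h | h
        · exact (hxa h).elim
        · have := ih i h
          simp [List.idxOf_cons_ne _ (by simpa using (Ne.symm hxa))]
          omega

theorem pv_idxOf_eq_of_fresh {x : Int} : ∀ (xs : List Int) (i : Nat), i < xs.length →
    xs.getD i 0 = x → x ∉ xs.take i → List.idxOf x xs = i := by
  intro xs
  induction xs with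
  | nil => intro i h; simp at h
  | cons a t ih =>
    intro i hlen hget hni
    cases i with
    | zero =>
      simp at hget; subst hget; simp [List.idxOf_cons_self]
    | succ i =>
      simp [List.take_succ_cons] at hni
      push Not at hni
      have hxa : x ≠ a := fun h => hni.1 h
      have := ih i (by simpa using hlen) (by simpa using hget) hni.2
      simp [List.idxOf_cons_ne _ (by simpa using (Ne.symm hxa)), this]

theorem pv_getD_mem_eraseIdx (xs : List Int) {j k : Nat} (hj : j < xs.length) (hne : j ≠ k) :
    xs.getD j 0 ∈ xs.eraseIdx k := by
  rcases Nat.lt_or_ge j k with h | h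
  · have hj' : j < (xs.eraseIdx k).length := by
      rw [List.length_eraseIdx]
      split <;> omega
    have : (xs.eraseIdx k)[j] = xs[j] := by
      rw [List.getElem_eraseIdx]
      simp [h]
    rw [List.getD_eq_getElem _ _ hj, ← this]
    exact List.getElem_mem _
  · have hk : k < j := by omega
    have hj' : j - 1 < (xs.eraseIdx k).length := by
      rw [List.length_eraseIdx]
      split <;> omega
    have : (xs.eraseIdx k)[j-1] = xs[j] := by
      rw [List.getElem_eraseIdx]
      split
      · omega
      · congr 1; omega
    rw [List.getD_eq_getElem _ _ hj, ← this]
    exact List.getElem_mem _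

theorem pv_idxOf?_eq_some : ∀ (xs : List Int) (x : Int), x ∈ xs → List.idxOf? x xs = some (List.idxOf x xs) := by
  intro xs
  induction xs with
  | nil => intro x h; simp at h
  | cons a t ih =>
    intro x h
    by_cases hxa : x = a
    · subst hxa; simp [List.idxOf?_cons]
    · have hx : x ∈ t := by
        rcases List.mem_cons.mp h with h1 | h1
        · exact (hxa h1).elim
        · exact h1
      rw [List.idxOf?_cons, List.idxOf_cons]
      have hax : (a == x) = false := by simp; exact fun h2 => hxa h2.symm
      simp [hax, ih x hx]

theorem pv_update_of_forall_mem {α : Type} [BEq α] [LawfulBEq α] :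
    ∀ (l : List α) (s : PySem.Set α), (∀ y ∈ l, y ∈ s) → PySem.Set.update s l = s := by
  intro l
  induction l with
  | nil => intro s _; simp [PySem.Set.update_eq_foldl]
  | cons y l ih =>
    intro s h
    rw [PySem.Set.update_eq_foldl]
    simp only [List.foldl_cons]
    rw [PySem.Set.add_of_mem (h y (by simp)), ← PySem.Set.update_eq_foldl]
    exact ih s (fun z hz => h z (by simp [hz]))

theorem pv_update_eq_append_filter {α : Type} [BEq α] [LawfulBEq α] :
    ∀ (l : List α) (s : PySem.Set α),
    PySem.Set.update s l = s ++ (PySem.Set.ofList l).filter (fun y => !s.contains y) := by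
  intro l
  induction l with
  | nil => intro s; simp [PySem.Set.update_eq_foldl, PySem.Set.ofList_nil]
  | cons y l ih =>
    intro s
    rw [PySem.Set.update_eq_foldl]
    simp only [List.foldl_cons]
    rw [← PySem.Set.update_eq_foldl, PySem.Set.ofList_cons]
    by_cases hy : y ∈ s
    · rw [PySem.Set.add_of_mem hy, ih s]
      congr 1
      rw [List.filter_cons]
      have : (!s.contains y) = false := by simp [hy]
      rw [this]
      simp only [PySem.Set.discard.eq_1, List.filter_filter]
      apply List.filter_congr
      intro z hz
      by_cases hzy : z = y <;> simp [hzy, List.contains_eq_mem, hy]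
    · rw [PySem.Set.add_of_not_mem hy, ih (s ++ [y])]
      rw [List.filter_cons]
      have : (!s.contains y) = true := by simp [hy]
      rw [this]
      simp only [PySem.Set.discard.eq_1, List.filter_filter, List.append_assoc, List.singleton_append]
      congr 2
      apply List.filter_congr
      intro z hz
      by_cases hzy : z = y <;> simp [hzy, List.contains_eq_mem]

theorem pv_ofList_map_inj {α β : Type} [BEq α] [LawfulBEq α] [BEq β] [LawfulBEq β]
    {g : α → β} (hg : Function.Injective g) :
    ∀ (l : List α), PySem.Set.ofList (l.map g) = (PySem.Set.ofList l).map g := by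
  intro l
  induction l with
  | nil => simp [PySem.Set.ofList_nil]
  | cons a l ih =>
    simp only [List.map_cons, PySem.Set.ofList_cons, ih]
    congr 1
    simp only [PySem.Set.discard.eq_1, List.filter_map]
    congr 1
    apply List.filter_congr
    intro z hz
    have hbe : (g z == g a) = (z == a) := by
      by_cases h : z = a
      · subst h; simp
      · have hne : ¬ g z = g a := fun hga => h (hg hga)
        simp [h, hne]
    simp [Function.comp, hbe]

theorem pv_foldl_update {α β : Type} [BEq α] (f : β → List α) :
    ∀ (l : List β) (s : PySem.Set α),
    l.foldl (fun s i => PySem.Set.update s (f i)) s = PySem.Set.update s (l.flatMap f) := by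
  intro l
  induction l with
  | nil => intro s; simp [PySem.Set.update_eq_foldl]
  | cons b l ih =>
    intro s
    simp only [List.foldl_cons, List.flatMap_cons, ih]
    simp [PySem.Set.update_eq_foldl, List.foldl_append]

theorem pv_map_getD_range' (xs : List Int) :
    ∀ (m a : Nat), a + m ≤ xs.length →
    (List.range' a m).map (fun j => xs.getD j 0) = (xs.drop a).take m := by
  intro m
  induction m with
  | zero => intro a _; simp
  | succ m ih =>
    intro a h
    have ha : a < xs.length := by omega
    rw [List.range'_succ, List.map_cons, ih (a+1) (by omega)]
    rw [List.drop_eq_getElem_cons ha, List.take_succ_cons]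
    rw [List.getD_eq_getElem _ _ ha]

theorem pv_map_getD_filter_ne (xs : List Int) {i : Nat} (hi : i < xs.length) :
    ((List.range xs.length).filter (fun j => i ≠ j)).map (fun j => xs.getD j 0) = xs.eraseIdx i := by
  have hsplit : List.range xs.length = List.range' 0 i ++ List.range' i (xs.length - i) := by
    rw [List.range_eq_range']
    have h := List.range'_append (s := 0) (m := i) (n := xs.length - i) (step := 1)
    simp only [Nat.zero_add, Nat.one_mul] at h
    rw [show xs.length = i + (xs.length - i) from by omega, ← h]
    have e : i + (xs.length - i) - i = xs.length - i := by omega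
    rw [e]
  have h2 : List.range' i (xs.length - i) = i :: List.range' (i+1) (xs.length - i - 1) := by
    have e : xs.length - i = (xs.length - i - 1) + 1 := by omega
    conv_lhs => rw [e, List.range'_succ]
  rw [hsplit, h2, List.filter_append, List.filter_cons]
  have hall : (List.range' 0 i).filter (fun j => decide ¬(i = j)) = List.range' 0 i := by
    apply List.filter_eq_self.mpr
    intro j hj
    have := List.mem_range'.mp hj
    simp; omega
  have hall2 : (List.range' (i+1) (xs.length - i - 1)).filter (fun j => decide ¬(i = j)) = List.range' (i+1) (xs.length - i - 1) := by
    apply List.filter_eq_self.mpr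
    intro j hj
    have := List.mem_range'.mp hj
    simp; omega
  simp only [ne_eq, hall, hall2]
  rw [if_neg (by simp)]
  rw [List.map_append, pv_map_getD_range' xs i 0 (by omega), pv_map_getD_range' xs (xs.length - i - 1) (i+1) (by omega)]
  rw [List.eraseIdx_eq_take_drop_succ]
  have e1 : List.take i (List.drop 0 xs) = List.take i xs := by simp
  have e2 : List.take (xs.length - i - 1) (List.drop (i+1) xs) = List.drop (i+1) xs :=
    List.take_of_length_le (by rw [List.length_drop]; omega)
  rw [e1, e2]

theorem pv_mem_rowB {xs : List Int} {a u v : Int} :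
    (u, v) ∈ pvRowB xs a ↔ u = a ∧ v ∈ xs.eraseIdx (List.idxOf a xs) := by
  simp only [pvRowB, List.mem_map, Prod.mk.injEq, PySem.Set.mem_ofList]
  constructor
  · rintro ⟨y, hy, rfl, rfl⟩; exact ⟨rfl, hy⟩
  · rintro ⟨rfl, hv⟩; exact ⟨v, hv, rfl, rfl⟩

theorem pv_mem_flatMap_rowB {xs : List Int} {d : List Int} {u v : Int} :
    (u, v) ∈ d.flatMap (pvRowB xs) ↔ u ∈ d ∧ v ∈ xs.eraseIdx (List.idxOf u xs) := by
  simp only [List.mem_flatMap]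
  constructor
  · rintro ⟨a, ha, hm⟩
    rcases pv_mem_rowB.mp hm with ⟨rfl, hv⟩
    exact ⟨ha, hv⟩
  · rintro ⟨hu, hv⟩
    exact ⟨u, hu, pv_mem_rowB.mpr ⟨rfl, hv⟩⟩

theorem pv_nodup_rowB (xs : List Int) (a : Int) : (pvRowB xs a).Nodup := by
  apply List.Nodup.map
  · intro y z h; simpa using h
  · exact PySem.Set.nodup_ofList _

theorem pv_nodup_flatMap_rowB (xs : List Int) :
    ∀ (d : List Int), d.Nodup → (d.flatMap (pvRowB xs)).Nodup := by
  intro d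
  induction d with
  | nil => intro _; simp
  | cons a d ih =>
    intro h
    rw [List.flatMap_cons]
    apply List.Nodup.append (pv_nodup_rowB xs a) (ih (List.Nodup.of_cons h))
    intro p hp hp2
    rcases p with ⟨u, v⟩
    rcases pv_mem_rowB.mp hp with ⟨rfl, _⟩
    rcases pv_mem_flatMap_rowB.mp hp2 with ⟨hu, _⟩
    exact (List.nodup_cons.mp h).1 hu

-- the heart: the first i rows of A's stream build exactly B's rows for take i
theorem pv_step2 (xs : List Int) :
    ∀ (i : Nat), i ≤ xs.length →
    PySem.Set.ofList ((List.range i).flatMap (pvRowA xs)) =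
      (PySem.Set.ofList (xs.take i)).flatMap (pvRowB xs) := by
  intro i
  induction i with
  | zero => intro _; simp [PySem.Set.ofList_nil]
  | succ i ih =>
    intro h
    have hi : i < xs.length := by omega
    have hx : xs.getD i 0 = xs[i] := List.getD_eq_getElem _ _ hi
    have htake : xs.take (i+1) = xs.take i ++ [xs.getD i 0] := by
      rw [List.take_add_one, List.getElem?_eq_getElem hi]
      rw [show xs.getD i 0 = xs[i] from List.getD_eq_getElem _ _ hi]
      rfl
    rw [List.range_succ, List.flatMap_append, List.flatMap_singleton,
      PySem.Set.ofList_append, ih (by omega), htake, PySem.Set.ofList_append_singleton]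
    set x := xs.getD i 0 with hxdef
    by_cases hmem : x ∈ xs.take i
    · -- duplicate row: every pair is already present
      rw [PySem.Set.add_of_mem ((PySem.Set.mem_ofList _ _).mpr hmem)]
      apply pv_update_of_forall_mem
      intro p hp
      rcases List.mem_map.mp hp with ⟨j, hj, rfl⟩
      have hj2 := List.mem_filter.mp hj
      have hjr : j < xs.length := List.mem_range.mp hj2.1
      have hjne : i ≠ j := by simpa using hj2.2
      have hk : List.idxOf x xs < i := pv_idxOf_lt_of_mem_take xs i hmem
      apply pv_mem_flatMap_rowB.mpr
      refine ⟨(PySem.Set.mem_ofList _ _).mpr hmem, ?_⟩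
      by_cases hjk : j = List.idxOf x xs
      · -- the inner index hits x's first occurrence: use x's occurrence at i instead
        have hkx : xs.getD j 0 = x := by
          subst hjk
          rw [List.getD_eq_getElem _ _ hjr]
          exact List.getElem_idxOf (by omega)
        rw [hkx]
        have := pv_getD_mem_eraseIdx xs hi (k := List.idxOf x xs) (by omega)
        simpa [← hxdef] using this
      · exact pv_getD_mem_eraseIdx xs hjr hjk
    · -- fresh row: it appends exactly B's row for x
      have hfresh : List.idxOf x xs = i := pv_idxOf_eq_of_fresh xs i hi rfl hmem
      have hnotof : x ∉ PySem.Set.ofList (xs.take i) := fun hc => hmem ((PySem.Set.mem_ofList _ _).mp hc)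
      rw [PySem.Set.add_of_not_mem hnotof]
      rw [pv_update_eq_append_filter]
      have hof : PySem.Set.ofList (pvRowA xs i) = pvRowB xs x := by
        have hmapmap : pvRowA xs i =
            (((List.range xs.length).filter (fun j => i ≠ j)).map (fun j => xs.getD j 0)).map
              (fun v => (x, v)) := by
          simp [pvRowA, List.map_map, Function.comp]
          intro a _ _
          rw [List.getElem?_eq_getElem hi]
          exact hx.symm
        rw [hmapmap, pv_map_getD_filter_ne xs hi,
          pv_ofList_map_inj (g := fun v => ((x : Int), v)) (fun a b hab => by simpa using hab)]
        rw [pvRowB, hfresh]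
      rw [hof]
      have hfilt : (pvRowB xs x).filter
          (fun y => !PySem.Set.contains ((PySem.Set.ofList (xs.take i)).flatMap (pvRowB xs)) y) = pvRowB xs x := by
        apply List.filter_eq_self.mpr
        intro p hp
        rcases p with ⟨u, v⟩
        rcases pv_mem_rowB.mp hp with ⟨rfl, _⟩
        simp only [PySem.Set.contains, List.contains_eq_mem, Bool.not_eq_eq_eq_not, Bool.not_true,
          decide_eq_false_iff_not]
        intro hc
        exact hmem ((PySem.Set.mem_ofList _ _).mp (pv_mem_flatMap_rowB.mp hc).1)
      rw [hfilt, List.flatMap_append, List.flatMap_singleton]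

theorem pv_portA_eq_target (xs : List Int) : generate_all_starting_pair xs = pvTarget xs := by
  unfold generate_all_starting_pair
  rw [show PySem.List.len xs = ((xs.length : Nat) : Int) from rfl]
  rw [PySem.List.pyRange_zero_nat]
  rw [List.foldl_map]
  have hinner : ∀ (s : PySem.Set (Int × Int)) (i : Nat),
      (List.map (fun (k : Nat) => (k : Int)) (List.range xs.length)).foldl
        (fun s j => if (i : Int) ≠ j then
          PySem.Set.add s (PySem.List.pyGetD xs (i : Int) 0, PySem.List.pyGetD xs j 0) else s) s
      = PySem.Set.update s (pvRowA xs i) := by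
    intro s i
    rw [List.foldl_map]
    have hcond : ∀ (s : PySem.Set (Int × Int)) (j : Nat),
        (if (i : Int) ≠ (j : Int) then
          PySem.Set.add s (PySem.List.pyGetD xs (i : Int) 0, PySem.List.pyGetD xs (j : Int) 0) else s)
        = (if i ≠ j then PySem.Set.add s (xs.getD i 0, xs.getD j 0) else s) := by
      intro s j
      rw [PySem.List.pyGetD_natCast, PySem.List.pyGetD_natCast]
      congr 1
      simp
    simp only [hcond]
    rw [PySem.List.foldl_ite_eq_foldl_filter (p := fun j => i ≠ j)
      (f := fun s j => PySem.Set.add s (xs.getD i 0, xs.getD j 0))]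
    rw [← List.foldl_map (f := fun j => ((xs.getD i 0, xs.getD j 0) : Int × Int)) (g := PySem.Set.add)]
    rw [← PySem.Set.update_eq_foldl]
    rfl
  simp only [hinner]
  rw [pv_foldl_update]
  rw [show (PySem.Set.empty : PySem.Set (Int × Int)) = [] from rfl]
  rw [show PySem.Set.update ([] : PySem.Set (Int × Int)) ((List.range xs.length).flatMap (pvRowA xs))
      = PySem.Set.ofList ((List.range xs.length).flatMap (pvRowA xs)) from rfl]
  rw [pv_step2 xs xs.length le_rfl, List.take_length]
  rfl

theorem pv_portB_eq_target (xs : List Int) : generate_all_starting_pair_alt xs = pvTarget xs := by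
  unfold generate_all_starting_pair_alt
  rw [PySem.List.dedup_eq_ofList]
  have hbody : ∀ (res : List (Int × Int)) (x : Int), x ∈ PySem.Set.ofList xs →
      (match PySem.List.remove? xs x with
        | some rest => (PySem.List.dedup rest).foldl (fun res y => res ++ [(x, y)]) res
        | none => res)
      = res ++ pvRowB xs x := by
    intro res x hx
    have hx2 : x ∈ xs := (PySem.Set.mem_ofList _ _).mp hx
    rw [show PySem.List.remove? xs x = Option.map (fun k => xs.eraseIdx k) (List.idxOf? x xs) from rfl]
    rw [pv_idxOf?_eq_some xs x hx2]
    simp only [Option.map_some]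
    rw [PySem.List.dedup_eq_ofList, PySem.List.foldl_append_singleton_eq_map]
    rfl
  rw [PySem.List.foldl_congr_mem _ _ (fun res x => res ++ pvRowB xs x) _ hbody]
  rw [PySem.List.foldl_append_eq_flatMap]
  rw [List.nil_append]
  exact PySem.Set.ofList_eq_self_of_nodup _ (pv_nodup_flatMap_rowB xs _ (PySem.Set.nodup_ofList xs))

-- ===== VERDICT (by name: the statement is the Claim_ definition above) =====
theorem generate_all_starting_pair_spec : Claim_equal_generate_all_starting_pair := by
  intro xs _
  unfold Spec_generate_all_starting_pair
  rw [pv_portA_eq_target, pv_portB_eq_target]
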